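-- pv_equiv track=rewrite | github.com/GozdeDogan/max_cost | maximum_cost_131044019.py | find_maximum_cost
-- ===== SOURCE A (Python) =====
-- def find_maximum_cost(Y):
--     X = []
--
--     if Y[0] <= 1:
--         X.append(1)
--     else:
--         if abs(Y[1] - Y[0]) >= abs(Y[0] - 1):
--             X.append(Y[0])
--         else:
--             X.append(1)
--
--     for i in range(1, len(Y)):
--         if Y[i] <= 1:
--             X.append(1)
--         else:
--             #print "X[i-1]:", X[i-1], "Y[i]:", Y[i]
--             if abs(Y[i] - X[i-1]) >= abs(X[i-1] - 1):
--                 X.append(Y[i])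
--             else:
--                 X.append(1)
--
--
--     #print "len(X):", len(X), "X:", X
--     cost = 0
--
--     for i in range(1, len(X)):
--         cost = cost + abs(X[i] - X[i-1])
--
--     return cost
-- ===== SOURCE B (Python) =====
-- def find_maximum_cost(Y):
--     # Run/peak decomposition: the greedy chain is a sequence of increasing "runs"
--     # separated by drops to 1; adjacent absolute differences telescope, so the cost
--     # is a closed formula over the run peaks: 2*sum(peak-1) - (last peak - 1) - (start - 1).
--     if Y[0] > 1 and (Y[1] <= 1 or Y[1] >= 2 * Y[0] - 1):
--         start = Y[0]
--     else:
--         start = 1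
--     peaks = []
--     cur = start
--     for y in Y[1:]:
--         if y > 1 and y >= 2 * cur - 1:
--             cur = y
--         else:
--             peaks.append(cur)
--             cur = 1
--     peaks.append(cur)
--     return 2 * sum(p - 1 for p in peaks) - (peaks[-1] - 1) - (start - 1)
-- ===== Notes on version B (the rewrite author's own statement) =====
-- stated objective: alternative
-- what changed: B replaces A's build-list-then-sum-adjacent-|differences| with a run/peak decomposition: the greedy chain consists of increasing runs separated by drops to 1, the adjacent differences telescope per run, so B collects only the run peaks in one pass (no abs calls, arithmetic threshold y >= 2*cur-1) and returns the closed formula 2*sum(peak-1) - (last peak - 1) - (start - 1).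
import Mathlib
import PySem

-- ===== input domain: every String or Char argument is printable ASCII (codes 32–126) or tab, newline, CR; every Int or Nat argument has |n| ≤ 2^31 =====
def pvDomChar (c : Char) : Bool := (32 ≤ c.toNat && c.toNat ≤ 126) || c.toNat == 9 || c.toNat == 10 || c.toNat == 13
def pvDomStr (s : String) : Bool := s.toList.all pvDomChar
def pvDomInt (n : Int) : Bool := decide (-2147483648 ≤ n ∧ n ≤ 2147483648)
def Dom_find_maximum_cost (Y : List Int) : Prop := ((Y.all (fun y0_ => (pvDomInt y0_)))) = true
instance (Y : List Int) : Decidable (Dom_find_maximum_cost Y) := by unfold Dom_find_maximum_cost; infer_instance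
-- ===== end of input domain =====

-- B replaces A's build-list-then-sum-adjacent-|differences| with a run/peak decomposition: one pass collecting run peaks, cost by the telescoped closed formula.


-- ===== PORT A =====
def find_maximum_cost (Y : List Int) : Int :=
  let x0 : Int :=
    if PySem.List.pyGetD Y 0 0 ≤ 1 then 1
    else if |PySem.List.pyGetD Y 1 0 - PySem.List.pyGetD Y 0 0| ≥ |PySem.List.pyGetD Y 0 0 - 1|
      then PySem.List.pyGetD Y 0 0 else 1
  let X : List Int := (PySem.List.pyRange 1 (Y.length : Int) 1).foldl
    (fun X i =>
      X ++ [if PySem.List.pyGetD Y i 0 ≤ 1 then 1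
        else if |PySem.List.pyGetD Y i 0 - PySem.List.pyGetD X (i-1) 0| ≥ |PySem.List.pyGetD X (i-1) 0 - 1|
          then PySem.List.pyGetD Y i 0 else 1]) [x0]
  (PySem.List.pyRange 1 (X.length : Int) 1).foldl
    (fun cost i => cost + |PySem.List.pyGetD X i 0 - PySem.List.pyGetD X (i-1) 0|) 0

-- ===== PORT B =====
def find_maximum_cost_alt (Y : List Int) : Int :=
  let start : Int :=
    if 1 < PySem.List.pyGetD Y 0 0 ∧
        (PySem.List.pyGetD Y 1 0 ≤ 1 ∨ PySem.List.pyGetD Y 1 0 ≥ 2 * PySem.List.pyGetD Y 0 0 - 1)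
      then PySem.List.pyGetD Y 0 0 else 1
  let s : Int × List Int := (PySem.List.slice Y (some 1) none).foldl
    (fun (s : Int × List Int) y =>
      if 1 < y ∧ y ≥ 2 * s.1 - 1 then (y, s.2) else (1, s.2 ++ [s.1])) (start, [])
  let peaks : List Int := s.2 ++ [s.1]
  2 * (peaks.foldl (fun a p => a + (p - 1)) 0)
    - (PySem.List.pyGetD peaks (-1) 0 - 1) - (start - 1)

-- ===== PRECONDITION & SPEC =====
-- Pre_ excludes exactly the inputs where Python A raises IndexError: the empty list,
-- and single-element lists whose element exceeds 1 (the first branch reads the second element); B raises there too.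
def Pre_find_maximum_cost (Y : List Int) : Prop := Y ≠ [] ∧ (Y.length = 1 → Y.headI ≤ 1)
instance (Y : List Int) : Decidable (Pre_find_maximum_cost Y) := by unfold Pre_find_maximum_cost; infer_instance
def pvWitness_find_maximum_cost : List Int := [3, -2, 5]
def Spec_find_maximum_cost (Y : List Int) (out : Int) : Prop := out = find_maximum_cost_alt Y
instance (Y : List Int) (out : Int) : Decidable (Spec_find_maximum_cost Y out) := by unfold Spec_find_maximum_cost; infer_instance

-- ===== CLAIM (what is proved, stated in full; the proofs are below) =====
def Claim_equal_find_maximum_cost : Prop := ∀ (Y : List Int), Dom_find_maximum_cost Y → Pre_find_maximum_cost Y → Spec_find_maximum_cost Y (find_maximum_cost Y)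

-- ===== LEMMAS AND PROOFS =====

-- the per-element greedy decision A makes
def pvStep (prev y : Int) : Int := if y ≤ 1 then 1 else if |y - prev| ≥ |prev - 1| then y else 1

-- the sequence of chosen values after a given prev (A's list X minus its head)
def pvChain (prev : Int) : List Int → List Int
  | [] => []
  | y :: ys => pvStep prev y :: pvChain (pvStep prev y) ys

-- sum of adjacent absolute differences along prev :: xs
def pvCost (prev : Int) : List Int → Int
  | [] => 0
  | x :: xs => |x - prev| + pvCost x xs

-- abs-free recursive form of the greedy cost (B's per-run view, unfolded)
def bRun (prev : Int) : List Int → Int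
  | [] => 0
  | y :: ys => if 1 < y ∧ y ≥ 2 * prev - 1 then (y - prev) + bRun y ys else (prev - 1) + bRun 1 ys

lemma step_char (p y : Int) (hp : 1 ≤ p) :
    pvStep p y = if 1 < y ∧ y ≥ 2 * p - 1 then y else 1 := by
  unfold pvStep
  rcases abs_cases (y - p) with ⟨h1, h2⟩ | ⟨h1, h2⟩ <;>
    rcases abs_cases (p - 1) with ⟨g1, g2⟩ | ⟨g1, g2⟩ <;>
    rw [h1, g1] <;> split_ifs <;> omega

lemma cost_bRun : ∀ (ys : List Int) (prev : Int), 1 ≤ prev →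
    pvCost prev (pvChain prev ys) = bRun prev ys := by
  intro ys
  induction ys with
  | nil => intro prev _; simp [pvChain, pvCost, bRun]
  | cons y ys ih =>
    intro prev hp
    unfold pvChain pvCost bRun
    rw [step_char prev y hp]
    by_cases h : 1 < y ∧ y ≥ 2 * prev - 1
    · simp only [if_pos h]
      rw [abs_of_nonneg (by omega), ih y (by omega)]
    · simp only [if_neg h]
      rw [abs_of_nonpos (by omega), ih 1 (by omega)]
      ring_nf

-- sum(p-1) as B computes it
def sumM1 (l : List Int) : Int := l.foldl (fun a p => a + (p - 1)) 0

lemma sumM1_shift : ∀ (l : List Int) (a : Int),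
    l.foldl (fun a p => a + (p - 1)) a = a + sumM1 l := by
  intro l
  induction l with
  | nil => intro a; simp [sumM1]
  | cons x l ih =>
    intro a
    simp only [List.foldl_cons, sumM1]
    rw [ih, ih (0 + (x - 1))]
    ring

lemma sumM1_append_singleton (l : List Int) (x : Int) :
    sumM1 (l ++ [x]) = sumM1 l + (x - 1) := by
  unfold sumM1
  rw [List.foldl_append, List.foldl_cons, List.foldl_nil, sumM1_shift]

-- B's fold, related to bRun
lemma bfold : ∀ (ys : List Int) (cur : Int) (peaks : List Int),
    (2 * sumM1 ((ys.foldl (fun (s : Int × List Int) y =>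
        if 1 < y ∧ y ≥ 2 * s.1 - 1 then (y, s.2) else (1, s.2 ++ [s.1])) (cur, peaks)).2
        ++ [(ys.foldl (fun (s : Int × List Int) y =>
        if 1 < y ∧ y ≥ 2 * s.1 - 1 then (y, s.2) else (1, s.2 ++ [s.1])) (cur, peaks)).1])
      - ((ys.foldl (fun (s : Int × List Int) y =>
        if 1 < y ∧ y ≥ 2 * s.1 - 1 then (y, s.2) else (1, s.2 ++ [s.1])) (cur, peaks)).1 - 1))
      = 2 * sumM1 peaks + (cur - 1) + bRun cur ys := by
  intro ys
  induction ys with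
  | nil =>
    intro cur peaks
    simp only [List.foldl_nil, bRun, sumM1_append_singleton]
    ring
  | cons y ys ih =>
    intro cur peaks
    simp only [List.foldl_cons, bRun]
    by_cases h : 1 < y ∧ y ≥ 2 * cur - 1
    · simp only [if_pos h]
      rw [ih y peaks]; ring
    · simp only [if_neg h]
      rw [ih 1 (peaks ++ [cur]), sumM1_append_singleton]; ring

-- A's per-element greedy decision both programs make (first element characterisation)
lemma x0_char (a b : Int) :
    (if a ≤ 1 then (1 : Int) else if |b - a| ≥ |a - 1| then a else 1)
      = if 1 < a ∧ (b ≤ 1 ∨ b ≥ 2 * a - 1) then a else 1 := by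
  rcases abs_cases (b - a) with ⟨h1, h2⟩ | ⟨h1, h2⟩ <;>
    rcases abs_cases (a - 1) with ⟨g1, g2⟩ | ⟨g1, g2⟩ <;>
    rw [h1, g1] <;> split_ifs <;> omega

lemma abuild (Y : List Int) : ∀ (fuel k : Nat) (X : List Int) (prev : Int),
    Y.length - k ≤ fuel → 1 ≤ k → X.length = k → X.getLast? = some prev →
    ((PySem.List.pyRange (k : Int) (Y.length : Int) 1).foldl
      (fun X i =>
        X ++ [if PySem.List.pyGetD Y i 0 ≤ 1 then 1
          else if |PySem.List.pyGetD Y i 0 - PySem.List.pyGetD X (i-1) 0| ≥ |PySem.List.pyGetD X (i-1) 0 - 1|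
            then PySem.List.pyGetD Y i 0 else 1]) X)
      = X ++ pvChain prev (Y.drop k) := by
  intro fuel
  induction fuel with
  | zero =>
    intro k X prev hf hk hX hlast
    rw [PySem.List.pyRange_one_eq_nil (by omega), List.drop_eq_nil_of_le (by omega)]
    simp [pvChain]
  | succ fuel ih =>
    intro k X prev hf hk hX hlast
    by_cases hkn : k < Y.length
    · rw [PySem.List.pyRange_one_cons (by exact_mod_cast hkn)]
      have hy : PySem.List.pyGetD Y (k : Int) 0 = Y[k] := by
        rw [PySem.List.pyGetD_natCast]; exact List.getD_eq_getElem Y 0 hkn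
      have hx : PySem.List.pyGetD X ((k : Int) - 1) 0 = prev := by
        have hcst : ((k : Int) - 1) = ((k - 1 : Nat) : Int) := by omega
        rw [hcst, PySem.List.pyGetD_natCast]
        have hlt : k - 1 < X.length := by omega
        rw [List.getD_eq_getElem X 0 hlt]
        have h2 : X[k-1]? = some prev := by
          rw [← hlast, List.getLast?_eq_getElem?, hX]
        rw [List.getElem?_eq_getElem hlt] at h2
        exact Option.some.inj h2
      simp only [List.foldl_cons, hy, hx]
      have hstep : (if Y[k] ≤ 1 then (1:Int) else if |Y[k] - prev| ≥ |prev - 1| then Y[k] else 1)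
          = pvStep prev Y[k] := rfl
      rw [hstep]
      have hcast : (k : Int) + 1 = ((k + 1 : Nat) : Int) := by push_cast; ring
      rw [hcast, ih (k+1) (X ++ [pvStep prev Y[k]]) (pvStep prev Y[k]) (by omega) (by omega)
        (by simp [hX]) (by simp),
        List.drop_eq_getElem_cons hkn]
      simp [pvChain]
    · rw [PySem.List.pyRange_one_eq_nil (by exact_mod_cast (by omega : Y.length ≤ k)),
        List.drop_eq_nil_of_le (by omega)]
      simp [pvChain]

lemma acost (X : List Int) : ∀ (fuel k : Nat) (acc prev : Int),
    X.length - k ≤ fuel → 1 ≤ k → X[k-1]? = some prev →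
    ((PySem.List.pyRange (k : Int) (X.length : Int) 1).foldl
      (fun cost i => cost + |PySem.List.pyGetD X i 0 - PySem.List.pyGetD X (i-1) 0|) acc)
      = acc + pvCost prev (X.drop k) := by
  intro fuel
  induction fuel with
  | zero =>
    intro k acc prev hf hk hprev
    rw [PySem.List.pyRange_one_eq_nil (by omega), List.drop_eq_nil_of_le (by omega)]
    simp [pvCost]
  | succ fuel ih =>
    intro k acc prev hf hk hprev
    by_cases hkn : k < X.length
    · rw [PySem.List.pyRange_one_cons (by exact_mod_cast hkn)]
      have hxk : PySem.List.pyGetD X (k : Int) 0 = X[k] := by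
        rw [PySem.List.pyGetD_natCast]; exact List.getD_eq_getElem X 0 hkn
      have hxp : PySem.List.pyGetD X ((k : Int) - 1) 0 = prev := by
        have hcst : ((k : Int) - 1) = ((k - 1 : Nat) : Int) := by omega
        rw [hcst, PySem.List.pyGetD_natCast]
        have hlt : k - 1 < X.length := by omega
        rw [List.getD_eq_getElem X 0 hlt]
        rw [List.getElem?_eq_getElem hlt] at hprev
        exact Option.some.inj hprev
      simp only [List.foldl_cons, hxk, hxp]
      have hcast : (k : Int) + 1 = ((k + 1 : Nat) : Int) := by push_cast; ring
      rw [hcast, ih (k+1) (acc + |X[k] - prev|) X[k] (by omega) (by omega)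
        (by simp [List.getElem?_eq_getElem hkn]),
        List.drop_eq_getElem_cons hkn]
      simp [pvCost]; ring
    · rw [PySem.List.pyRange_one_eq_nil (by exact_mod_cast (by omega : X.length ≤ k)),
        List.drop_eq_nil_of_le (by omega)]
      simp [pvCost]

-- ===== VERDICT (by name: the statement is the Claim_ definition above) =====
theorem find_maximum_cost_spec : Claim_equal_find_maximum_cost := by
  intro Y _ _
  unfold Spec_find_maximum_cost find_maximum_cost find_maximum_cost_alt
  rw [x0_char]
  set st : Int :=
    if 1 < PySem.List.pyGetD Y 0 0 ∧
        (PySem.List.pyGetD Y 1 0 ≤ 1 ∨ PySem.List.pyGetD Y 1 0 ≥ 2 * PySem.List.pyGetD Y 0 0 - 1)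
      then PySem.List.pyGetD Y 0 0 else 1 with hst
  dsimp only
  -- A side: build X then sum adjacent absolute differences
  have hbuild := abuild Y Y.length 1 [st] st (by omega) (by omega) rfl rfl
  simp only [Nat.cast_one] at hbuild
  rw [hbuild]
  have hX : ([st] ++ pvChain st (Y.drop 1)) = st :: pvChain st (Y.drop 1) := rfl
  rw [hX]
  have hcost := acost (st :: pvChain st (Y.drop 1)) (st :: pvChain st (Y.drop 1)).length 1 0 st
    (by omega) (by omega) (by simp)
  simp only [Nat.cast_one] at hcost
  rw [hcost]
  -- B side: peaks fold then closed formula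
  rw [PySem.List.slice_from_one, ← List.drop_one]
  rw [PySem.List.pyGetD_neg_one_append_singleton]
  have hb := bfold (Y.drop 1) st []
  have hstart : (1 : Int) ≤ st := by
    rw [hst]; split_ifs with h <;> omega
  have hdrop : List.drop 1 (st :: pvChain st (Y.drop 1)) = pvChain st (Y.drop 1) := rfl
  rw [hdrop, cost_bRun (Y.drop 1) st hstart]
  unfold sumM1 at hb
  simp only [List.foldl_nil] at hb
  omega
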